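-- pv_equiv track=rewrite | github.com/humans-and-machines/Illusion-of-Reasoning | src/utils/_prune_common.py | _strategy_sample_idx_unique
-- ===== SOURCE A (Python) =====
-- from typing import Callable, Dict, List, Optional, Set, Tuple
--
-- def _strategy_sample_idx_unique(
--     items: List[Tuple[int, Optional[int]]],
--     items_sorted: List[Tuple[int, Optional[int]]],
--     keep_k: int,
-- ) -> List[Tuple[int, Optional[int]]]:
--     """
--     Prefer unique sample_idx values; fall back to remaining items to reach keep_k.
--     """
--     del items  # unused; kept for uniform signature
--     kept_items: List[Tuple[int, Optional[int]]] = []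
--     seen_sample_indices: Set[int] = set()
--
--     for line_index, sample_idx in items_sorted:
--         if sample_idx is None:
--             continue
--         if sample_idx not in seen_sample_indices:
--             kept_items.append((line_index, sample_idx))
--             seen_sample_indices.add(sample_idx)
--             if len(kept_items) >= keep_k:
--                 break
--
--     if len(kept_items) < keep_k:
--         kept_set = set(kept_items)
--         for line_index, sample_idx in items_sorted:
--             if (line_index, sample_idx) in kept_set:
--                 continue
--             kept_items.append((line_index, sample_idx))
--             kept_set.add((line_index, sample_idx))
--             if len(kept_items) >= keep_k:
--                 break
--     return kept_items
-- ===== SOURCE B (Python) =====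
-- from typing import List, Optional, Set, Tuple
--
--
-- def _strategy_sample_idx_unique(
--     items: List[Tuple[int, Optional[int]]],
--     items_sorted: List[Tuple[int, Optional[int]]],
--     keep_k: int,
-- ) -> List[Tuple[int, Optional[int]]]:
--     """Single pass: bucket each item as a unique-sample pick or a leftover, then truncate."""
--     del items  # unused; kept for uniform signature
--     uniques: List[Tuple[int, Optional[int]]] = []
--     leftovers: List[Tuple[int, Optional[int]]] = []
--     seen_samples: Set[int] = set()
--     seen_tuples: Set[Tuple[int, Optional[int]]] = set()
--
--     for line_index, sample_idx in items_sorted: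
--         if sample_idx is not None and sample_idx not in seen_samples:
--             uniques.append((line_index, sample_idx))
--             seen_samples.add(sample_idx)
--             seen_tuples.add((line_index, sample_idx))
--         elif (line_index, sample_idx) not in seen_tuples:
--             leftovers.append((line_index, sample_idx))
--             seen_tuples.add((line_index, sample_idx))
--
--     return (uniques + leftovers)[: max(keep_k, 0)]
-- ===== Notes on version B (the rewrite author's own statement) =====
-- stated objective: simpler
-- what changed: A makes two passes over items_sorted with early-break bookkeeping (a unique-sample pass, then a fallback pass re-scanning from the start against a rebuilt kept-set); B makes a single pass that buckets every item once into uniques or deduplicated leftovers and truncates the concatenation to keep_k.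
-- intended difference: When keep_k <= 0 and items_sorted contains an item with non-None sample_idx, A returns a one-element list (its break test runs only after appending), while B returns [], the intended result of keeping at most zero items. — e.g. on _strategy_sample_idx_unique([], [(0, some 0)], 0): A returns [(0, some 0)], B returns []
import Mathlib
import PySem

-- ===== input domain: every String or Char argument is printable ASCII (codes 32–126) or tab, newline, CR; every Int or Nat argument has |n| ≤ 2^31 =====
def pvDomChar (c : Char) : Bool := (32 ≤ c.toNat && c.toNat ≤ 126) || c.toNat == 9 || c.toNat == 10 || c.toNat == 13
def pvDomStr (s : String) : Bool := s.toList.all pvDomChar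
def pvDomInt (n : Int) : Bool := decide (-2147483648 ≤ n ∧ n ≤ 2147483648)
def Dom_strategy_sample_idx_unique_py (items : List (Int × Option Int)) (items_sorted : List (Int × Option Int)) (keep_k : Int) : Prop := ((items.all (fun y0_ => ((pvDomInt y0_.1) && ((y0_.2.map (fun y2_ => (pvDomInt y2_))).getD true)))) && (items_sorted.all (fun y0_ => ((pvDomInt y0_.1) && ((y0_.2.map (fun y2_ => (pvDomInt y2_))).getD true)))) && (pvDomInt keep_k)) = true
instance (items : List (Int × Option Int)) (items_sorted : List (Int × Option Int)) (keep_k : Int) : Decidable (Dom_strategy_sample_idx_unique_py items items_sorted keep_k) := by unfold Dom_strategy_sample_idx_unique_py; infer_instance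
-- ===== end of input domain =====

-- B replaces A's two early-breaking passes by one bucketing pass plus a final truncation (simpler);
-- for keep_k ≤ 0 with a non-None sample present, A returns one item and B returns [] (see D_ below).


-- ===== PORT A =====
-- first for-loop of A: collect items with fresh sample_idx, break once keep_k are kept
def aLoop1 (l : List (Int × Option Int)) (kept : List (Int × Option Int))
    (seen : PySem.Set Int) (keep_k : Int) : List (Int × Option Int) × PySem.Set Int :=
  match l with
  | [] => (kept, seen)
  | (li, si) :: rest =>
    match si with
    | none => aLoop1 rest kept seen keep_k
    | some s =>
      if PySem.Set.contains seen s = false then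
        let kept' := kept ++ [(li, some s)]
        if (kept'.length : Int) ≥ keep_k then (kept', PySem.Set.add seen s)
        else aLoop1 rest kept' (PySem.Set.add seen s) keep_k
      else aLoop1 rest kept seen keep_k

-- second for-loop of A: fall back to any not-yet-kept tuples, break once keep_k are kept
def aLoop2 (l : List (Int × Option Int)) (kept : List (Int × Option Int))
    (keptSet : PySem.Set (Int × Option Int)) (keep_k : Int) : List (Int × Option Int) :=
  match l with
  | [] => kept
  | t :: rest =>
    if PySem.Set.contains keptSet t then aLoop2 rest kept keptSet keep_k
    else
      let kept' := kept ++ [t]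
      if (kept'.length : Int) ≥ keep_k then kept'
      else aLoop2 rest kept' (PySem.Set.add keptSet t) keep_k

def strategy_sample_idx_unique_py (items : List (Int × Option Int)) (items_sorted : List (Int × Option Int)) (keep_k : Int) : List (Int × Option Int) :=
  -- `del items`: the parameter is unused
  let kept1 := (aLoop1 items_sorted [] PySem.Set.empty keep_k).1
  if (kept1.length : Int) < keep_k then
    aLoop2 items_sorted kept1 (PySem.Set.ofList kept1) keep_k
  else kept1

-- ===== PORT B =====
-- B's single pass: each item goes to `uniques` (fresh non-None sample_idx) or, if its tuple is new, to `leftovers`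
def bLoop (l : List (Int × Option Int)) (uniques leftovers : List (Int × Option Int))
    (seenS : PySem.Set Int) (seenT : PySem.Set (Int × Option Int)) :
    List (Int × Option Int) × List (Int × Option Int) :=
  match l with
  | [] => (uniques, leftovers)
  | (li, si) :: rest =>
    match si with
    | some s =>
      if PySem.Set.contains seenS s = false then
        bLoop rest (uniques ++ [(li, some s)]) leftovers (PySem.Set.add seenS s) (PySem.Set.add seenT (li, some s))
      else if PySem.Set.contains seenT (li, some s) = false then
        bLoop rest uniques (leftovers ++ [(li, some s)]) seenS (PySem.Set.add seenT (li, some s))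
      else bLoop rest uniques leftovers seenS seenT
    | none =>
      if PySem.Set.contains seenT (li, none) = false then
        bLoop rest uniques (leftovers ++ [(li, none)]) seenS (PySem.Set.add seenT (li, none))
      else bLoop rest uniques leftovers seenS seenT

def strategy_sample_idx_unique_py_alt (items : List (Int × Option Int)) (items_sorted : List (Int × Option Int)) (keep_k : Int) : List (Int × Option Int) :=
  -- `del items`: the parameter is unused
  let p := bLoop items_sorted [] [] PySem.Set.empty PySem.Set.empty
  -- Python slice [:max(keep_k, 0)] with a nonnegative bound is List.take
  (p.1 ++ p.2).take (max keep_k 0).toNat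

-- ===== PRECONDITION & SPEC =====
-- When keep_k ≤ 0 and items_sorted contains an item with non-None sample_idx, A returns a one-element
-- list (its break test runs only after appending), while B returns [], the intended result of keeping
-- at most zero items.
def D_strategy_sample_idx_unique_py (items : List (Int × Option Int)) (items_sorted : List (Int × Option Int)) (keep_k : Int) : Prop :=
  keep_k ≤ 0 ∧ ∃ p ∈ items_sorted, p.2 ≠ none
instance (items : List (Int × Option Int)) (items_sorted : List (Int × Option Int)) (keep_k : Int) : Decidable (D_strategy_sample_idx_unique_py items items_sorted keep_k) := by unfold D_strategy_sample_idx_unique_py; infer_instance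

def Spec_strategy_sample_idx_unique_py (items : List (Int × Option Int)) (items_sorted : List (Int × Option Int)) (keep_k : Int) (out : List (Int × Option Int)) : Prop := ¬ D_strategy_sample_idx_unique_py items items_sorted keep_k → out = strategy_sample_idx_unique_py_alt items items_sorted keep_k
instance (items : List (Int × Option Int)) (items_sorted : List (Int × Option Int)) (keep_k : Int) (out : List (Int × Option Int)) : Decidable (Spec_strategy_sample_idx_unique_py items items_sorted keep_k out) := by unfold Spec_strategy_sample_idx_unique_py; infer_instance

def pvDiffWitness_strategy_sample_idx_unique_py : (List (Int × Option Int)) × (List (Int × Option Int)) × Int :=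
  ([], [(0, some 0)], 0)
def pvDiffWitnessOut_strategy_sample_idx_unique_py : (List (Int × Option Int)) × (List (Int × Option Int)) :=
  ([(0, some 0)], [])

-- ===== CLAIM (what is proved, stated in full; the proofs are below) =====
def Claim_unchanged_strategy_sample_idx_unique_py : Prop := ∀ (items : List (Int × Option Int)) (items_sorted : List (Int × Option Int)) (keep_k : Int), Dom_strategy_sample_idx_unique_py items items_sorted keep_k → Spec_strategy_sample_idx_unique_py items items_sorted keep_k (strategy_sample_idx_unique_py items items_sorted keep_k)
def Claim_changed_strategy_sample_idx_unique_py : Prop := Dom_strategy_sample_idx_unique_py (pvDiffWitness_strategy_sample_idx_unique_py.1) (pvDiffWitness_strategy_sample_idx_unique_py.2.1) (pvDiffWitness_strategy_sample_idx_unique_py.2.2) ∧ D_strategy_sample_idx_unique_py (pvDiffWitness_strategy_sample_idx_unique_py.1) (pvDiffWitness_strategy_sample_idx_unique_py.2.1) (pvDiffWitness_strategy_sample_idx_unique_py.2.2) ∧ strategy_sample_idx_unique_py (pvDiffWitness_strategy_sample_idx_unique_py.1) (pvDiffWitness_strategy_sample_idx_unique_py.2.1) (pvDiffWitness_strategy_sample_idx_unique_py.2.2)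 = pvDiffWitnessOut_strategy_sample_idx_unique_py.1 ∧ strategy_sample_idx_unique_py_alt (pvDiffWitness_strategy_sample_idx_unique_py.1) (pvDiffWitness_strategy_sample_idx_unique_py.2.1) (pvDiffWitness_strategy_sample_idx_unique_py.2.2) = pvDiffWitnessOut_strategy_sample_idx_unique_py.2 ∧ pvDiffWitnessOut_strategy_sample_idx_unique_py.1 ≠ pvDiffWitnessOut_strategy_sample_idx_unique_py.2
def Claim_exact_strategy_sample_idx_unique_py : Prop := ∀ (items : List (Int × Option Int)) (items_sorted : List (Int × Option Int)) (keep_k : Int), Dom_strategy_sample_idx_unique_py items items_sorted keep_k → D_strategy_sample_idx_unique_py items items_sorted keep_k → strategy_sample_idx_unique_py items items_sorted keep_k ≠ strategy_sample_idx_unique_py_alt items items_sorted keep_k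

-- ===== LEMMAS AND PROOFS =====

-- reference: the full unique-sample sublist of l given already-seen samples
def uref (l : List (Int × Option Int)) (seen : PySem.Set Int) : List (Int × Option Int) :=
  match l with
  | [] => []
  | (li, si) :: rest =>
    match si with
    | none => uref rest seen
    | some s =>
      if PySem.Set.contains seen s = false then (li, some s) :: uref rest (PySem.Set.add seen s)
      else uref rest seen

-- reference: ordered first occurrences of tuples of l not in `seen` (a plain list of already-taken tuples)
def lref (l : List (Int × Option Int)) (seen : List (Int × Option Int)) : List (Int × Option Int) :=
  match l with
  | [] => []
  | t :: rest => if t ∈ seen then lref rest seen else t :: lref rest (t :: seen)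

theorem lref_congr (l : List (Int × Option Int)) :
    ∀ s1 s2, (∀ t, t ∈ s1 ↔ t ∈ s2) → lref l s1 = lref l s2 := by
  induction l with
  | nil => intro _ _ _; rfl
  | cons t rest ih =>
    intro s1 s2 h
    simp only [lref]
    by_cases ht : t ∈ s1
    · rw [if_pos ht, if_pos ((h t).1 ht)]
      exact ih _ _ h
    · rw [if_neg ht, if_neg (fun hc => ht ((h t).2 hc))]
      refine congrArg _ (ih _ _ ?_)
      intro x; simp only [List.mem_cons]
      exact or_congr Iff.rfl (h x)


theorem take_append_cons {α : Type} (xs : List α) (y : α) (zs : List α) :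
    (xs ++ y :: zs).take (xs.length + 1) = xs ++ [y] := by
  induction xs with
  | nil => simp
  | cons a xs ih => simp [ih]

theorem uref_samples (l : List (Int × Option Int)) :
    ∀ seen t, t ∈ uref l seen → ∃ s, t.2 = some s ∧ s ∉ seen := by
  induction l with
  | nil => intro _ _ h; simp [uref] at h
  | cons p rest ih =>
    intro seen t h
    obtain ⟨li, si⟩ := p
    match si with
    | none => exact ih seen t h
    | some s =>
      simp only [uref] at h
      by_cases hc : PySem.Set.contains seen s = false
      · rw [if_pos hc] at h
        rcases List.mem_cons.1 h with h | h
        · subst h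
          refine ⟨s, rfl, ?_⟩
          intro hm
          rw [(PySem.Set.contains_iff seen s).2 hm] at hc
          simp at hc
        · obtain ⟨s', hs', hns'⟩ := ih _ t h
          refine ⟨s', hs', fun hm => hns' ?_⟩
          exact (PySem.Set.mem_add _ _ _).2 (Or.inl hm)
      · rw [if_neg hc] at h
        exact ih seen t h

theorem aLoop1_eq (l : List (Int × Option Int)) :
    ∀ kept seen (k : Int), (kept.length : Int) < k →
      (aLoop1 l kept seen k).1 = (kept ++ uref l seen).take k.toNat := by
  induction l with
  | nil =>
    intro kept seen k hk
    simp only [aLoop1, uref, List.append_nil]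
    exact (List.take_of_length_le (by omega)).symm
  | cons p rest ih =>
    intro kept seen k hk
    obtain ⟨li, si⟩ := p
    match si with
    | none => simpa only [aLoop1, uref] using ih kept seen k hk
    | some s =>
      simp only [aLoop1, uref]
      by_cases hc : PySem.Set.contains seen s = false
      · rw [if_pos hc, if_pos hc]
        by_cases hlen : ((kept ++ [(li, some s)]).length : Int) ≥ k
        · rw [if_pos hlen]
          simp only [List.length_append, List.length_cons, List.length_nil] at hlen
          have hkn : k.toNat = kept.length + 1 := by omega
          rw [hkn]
          exact (take_append_cons kept _ _).symm
        · rw [if_neg hlen]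
          have := ih (kept ++ [(li, some s)]) (PySem.Set.add seen s) k
            (by simp only [List.length_append, List.length_cons, List.length_nil] at *; push_cast; omega)
          rw [this, List.append_assoc]
          rfl
      · rw [if_neg hc, if_neg hc]
        exact ih kept seen k hk

theorem aLoop2_eq (l : List (Int × Option Int)) :
    ∀ kept (seen : PySem.Set (Int × Option Int)) (k : Int), (kept.length : Int) < k →
      aLoop2 l kept seen k = (kept ++ lref l seen).take k.toNat := by
  induction l with
  | nil =>
    intro kept seen k hk
    simp only [aLoop2, lref, List.append_nil]
    exact (List.take_of_length_le (by omega)).symm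
  | cons t rest ih =>
    intro kept seen k hk
    simp only [aLoop2, lref]
    by_cases hc : PySem.Set.contains seen t
    · rw [if_pos hc, if_pos ((PySem.Set.contains_iff seen t).1 hc)]
      exact ih kept seen k hk
    · have htm : t ∉ seen := fun hm => hc ((PySem.Set.contains_iff seen t).2 hm)
      rw [if_neg hc, if_neg htm]
      by_cases hlen : ((kept ++ [t]).length : Int) ≥ k
      · rw [if_pos hlen]
        simp only [List.length_append, List.length_cons, List.length_nil] at hlen
        have hkn : k.toNat = kept.length + 1 := by omega
        rw [hkn]
        exact (take_append_cons kept _ _).symm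
      · rw [if_neg hlen]
        have := ih (kept ++ [t]) (PySem.Set.add seen t) k
          (by simp only [List.length_append, List.length_cons, List.length_nil] at *; push_cast; omega)
        rw [this, List.append_assoc]
        refine congrArg _ (congrArg _ (congrArg _ ?_))
        refine lref_congr rest _ _ (fun x => ?_)
        rw [PySem.Set.mem_add]
        simp [or_comm]

theorem bLoop_eq (l : List (Int × Option Int)) :
    ∀ u lf (ss : PySem.Set Int) (st : PySem.Set (Int × Option Int)),
      bLoop l u lf ss st = (u ++ uref l ss, lf ++ lref l (st ++ uref l ss)) := by
  induction l with
  | nil => intro u lf ss st; simp [bLoop, uref, lref]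
  | cons p rest ih =>
    intro u lf ss st
    obtain ⟨li, si⟩ := p
    match si with
    | some s =>
      simp only [bLoop, uref]
      by_cases hc : PySem.Set.contains ss s = false
      · rw [if_pos hc, if_pos hc, ih]
        refine Prod.ext ?_ ?_
        · simp [List.append_assoc]
        · simp only
          have hcong : lref rest (PySem.Set.add st (li, some s) ++ uref rest (PySem.Set.add ss s)) =
              lref rest (st ++ (li, some s) :: uref rest (PySem.Set.add ss s)) :=
            lref_congr rest _ _ (fun x => by
              simp only [List.mem_append, List.mem_cons, PySem.Set.mem_add]; tauto)
          rw [hcong]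
          simp only [lref]
          rw [if_pos (by simp)]
      · have hs : s ∈ ss := by
          refine (PySem.Set.contains_iff ss s).1 ?_
          cases h : PySem.Set.contains ss s
          · exact absurd h hc
          · rfl
        rw [if_neg hc, if_neg hc]
        have hnotu : (li, some s) ∉ uref rest ss := by
          intro hm
          obtain ⟨s', hs', hns'⟩ := uref_samples rest ss _ hm
          simp only at hs'
          cases hs'
          exact hns' hs
        by_cases ht : PySem.Set.contains st (li, some s) = false
        · rw [if_pos ht, ih]
          have htm : (li, some s) ∉ (st : List (Int × Option Int)) := by
            intro hm
            rw [(PySem.Set.contains_iff st _).2 hm] at ht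
            simp at ht
          refine Prod.ext rfl ?_
          simp only [lref]
          rw [if_neg (by simp only [List.mem_append]; tauto)]
          rw [List.append_assoc]
          refine congrArg _ (congrArg _ ?_)
          refine lref_congr rest _ _ (fun x => ?_)
          simp only [List.mem_append, List.mem_cons, PySem.Set.mem_add]
          tauto
        · have htm : (li, some s) ∈ (st : List (Int × Option Int)) := by
            refine (PySem.Set.contains_iff st _).1 ?_
            cases h : PySem.Set.contains st (li, some s)
            · exact absurd h ht
            · rfl
          rw [if_neg ht, ih]
          refine Prod.ext rfl ?_
          simp only [lref]
          rw [if_pos (by simp only [List.mem_append]; tauto)]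
    | none =>
      simp only [bLoop, uref]
      have hnotu : ((li, none) : Int × Option Int) ∉ uref rest ss := by
        intro hm
        obtain ⟨s', hs', _⟩ := uref_samples rest ss _ hm
        simp at hs'
      by_cases ht : PySem.Set.contains st (li, none) = false
      · rw [if_pos ht, ih]
        have htm : ((li, none) : Int × Option Int) ∉ (st : List (Int × Option Int)) := by
          intro hm
          rw [(PySem.Set.contains_iff st _).2 hm] at ht
          simp at ht
        refine Prod.ext rfl ?_
        simp only [lref]
        rw [if_neg (by simp only [List.mem_append]; tauto)]
        rw [List.append_assoc]
        refine congrArg _ (congrArg _ ?_)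
        refine lref_congr rest _ _ (fun x => ?_)
        simp only [List.mem_append, List.mem_cons, PySem.Set.mem_add]
        tauto
      · have htm : ((li, none) : Int × Option Int) ∈ (st : List (Int × Option Int)) := by
          refine (PySem.Set.contains_iff st _).1 ?_
          cases h : PySem.Set.contains st (li, none)
          · exact absurd h ht
          · rfl
        rw [if_neg ht, ih]
        refine Prod.ext rfl ?_
        simp only [lref]
        rw [if_pos (by simp only [List.mem_append]; tauto)]

-- all sample indices None: A's first loop keeps nothing
theorem aLoop1_all_none (l : List (Int × Option Int)) :
    ∀ kept seen k, (∀ p ∈ l, p.2 = none) → aLoop1 l kept seen k = (kept, seen) := by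
  induction l with
  | nil => intro _ _ _ _; rfl
  | cons p rest ih =>
    intro kept seen k h
    obtain ⟨li, si⟩ := p
    have : si = none := h (li, si) (List.mem_cons_self)
    subst this
    exact ih kept seen k (fun q hq => h q (List.mem_cons_of_mem _ hq))

-- keep_k ≤ 0 with a non-None sample present: A's first loop keeps (exactly) one item
theorem aLoop1_ne_nil (l : List (Int × Option Int)) :
    ∀ (k : Int), k ≤ 0 → (∃ p ∈ l, p.2 ≠ none) →
      (aLoop1 l [] PySem.Set.empty k).1 ≠ [] := by
  induction l with
  | nil => intro _ _ h; simp at h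
  | cons p rest ih =>
    intro k hk h
    obtain ⟨li, si⟩ := p
    match si with
    | none =>
      simp only [aLoop1]
      refine ih k hk ?_
      obtain ⟨q, hq, hq2⟩ := h
      rcases List.mem_cons.1 hq with h' | h'
      · subst h'; simp at hq2
      · exact ⟨q, h', hq2⟩
    | some s =>
      simp only [aLoop1]
      have hc : PySem.Set.contains PySem.Set.empty s = false := rfl
      rw [if_pos hc, if_pos (by simp; omega)]
      simp

theorem main_unchanged (items l : List (Int × Option Int)) (k : Int)
    (hD : ¬ D_strategy_sample_idx_unique_py items l k) :
    strategy_sample_idx_unique_py items l k = strategy_sample_idx_unique_py_alt items l k := by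
  by_cases hk : 1 ≤ k
  · -- U is the full unique-sample list
    set U := uref l PySem.Set.empty with hU
    have hA1 : (aLoop1 l [] PySem.Set.empty k).1 = U.take k.toNat := by
      simpa using aLoop1_eq l [] PySem.Set.empty k (by simp; omega)
    have hB : strategy_sample_idx_unique_py_alt items l k = (U ++ lref l U).take k.toNat := by
      simp only [strategy_sample_idx_unique_py_alt, bLoop_eq]
      have : max k 0 = k := by omega
      rw [this]
      rfl
    simp only [strategy_sample_idx_unique_py, hA1]
    by_cases hlen : U.length < k.toNat
    · -- not enough uniques: A runs its fallback loop
      have htake : U.take k.toNat = U := List.take_of_length_le (by omega)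
      rw [htake, if_pos (by push_cast; omega)]
      rw [aLoop2_eq l U (PySem.Set.ofList U) k (by push_cast; omega), hB]
      refine congrArg _ (congrArg _ ?_)
      exact lref_congr l (PySem.Set.ofList U) U (fun x => PySem.Set.mem_ofList U x)
    · -- k uniques found: both sides are the first k uniques
      have hlen2 : (U.take k.toNat).length = k.toNat := by
        rw [List.length_take]; omega
      rw [if_neg (by rw [hlen2]; omega)]
      rw [hB, List.take_append_of_le_length (by omega)]
  · -- keep_k ≤ 0: outside D_ every sample_idx is None, both return []
    have hnone : ∀ p ∈ l, p.2 = none := by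
      intro p hp
      by_contra hne
      exact hD ⟨by omega, p, hp, hne⟩
    simp only [strategy_sample_idx_unique_py, aLoop1_all_none l [] PySem.Set.empty k hnone]
    rw [if_neg (by simp; omega)]
    simp only [strategy_sample_idx_unique_py_alt]
    have : max k 0 = 0 := by omega
    rw [this]
    simp

-- ===== VERDICT (by name: the statement is the Claim_ definition above) =====
theorem strategy_sample_idx_unique_py_spec : Claim_unchanged_strategy_sample_idx_unique_py := by
  intro items l k _ hD
  exact main_unchanged items l k hD

theorem strategy_sample_idx_unique_py_changed : Claim_changed_strategy_sample_idx_unique_py := by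
  unfold Claim_changed_strategy_sample_idx_unique_py; decide

theorem strategy_sample_idx_unique_py_tight : Claim_exact_strategy_sample_idx_unique_py := by
  intro items l k _ hD
  obtain ⟨hk, hex⟩ := hD
  have hA1 := aLoop1_ne_nil l k hk hex
  intro heq
  have hBnil : strategy_sample_idx_unique_py_alt items l k = [] := by
    simp only [strategy_sample_idx_unique_py_alt]
    have : max k 0 = 0 := by omega
    rw [this]
    simp
  rw [hBnil] at heq
  simp only [strategy_sample_idx_unique_py] at heq
  by_cases hc : (((aLoop1 l [] PySem.Set.empty k).1.length : Int) < k)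
  · have : (aLoop1 l [] PySem.Set.empty k).1.length = 0 := by
      have := Int.lt_iff_add_one_le.1 hc
      omega
    exact hA1 (List.eq_nil_of_length_eq_zero this)
  · rw [if_neg hc] at heq
    exact hA1 heq
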